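-- pv_equiv track=rewrite | github.com/ikram28/MedInjection-FR | Eval.py | parse_letters_from_text
-- ===== SOURCE A (Python) =====
-- from typing import Dict, List, Optional, Tuple, Any
--
-- def parse_letters_from_text(text: str, valid_letters: List[str], multi: bool) -> List[str]:
--     if text is None:
--         return []
--     s = text.upper().strip()
--     letters = [v.upper() for v in valid_letters]
--     letter_set = set(letters)
--     allowed_nonletters = set([',', ';', '/', '|', '+', ' ', '\n', '.', '(', ')', ':'])
--
--     for ch in s:
--         if ch.isalpha() and ch not in letter_set:
--             return []
--         if not ch.isalpha() and ch not in allowed_nonletters: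
--             return []
--
--     preds = [ch for ch in s if ch in letter_set]
--     seen = set()
--     preds = [x for x in preds if not (x in seen or seen.add(x))]
--     if not multi:
--         return preds if len(preds) == 1 else []
--     return preds
-- ===== SOURCE B (Python) =====
-- def parse_letters_from_text(text, valid_letters, multi):
--     if text is None:
--         return []
--     s = text.upper().strip()
--     letters = {v.upper() for v in valid_letters}
--     allowed = set(",;/|+ \n.():")
--     chars = set(s)
--     alphas = {c for c in chars if c.isalpha()}
--     if not (alphas <= letters and chars - alphas <= allowed):
--         return []
--     preds = sorted(chars & letters, key=s.find)
--     return preds if multi or len(preds) == 1 else []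
-- ===== Notes on version B (the rewrite author's own statement) =====
-- stated objective: faster
-- what changed: B replaces A's per-character early-return validation loop and seen-set dedup pass with set algebra: it builds the set of distinct characters once, validates it with two subset tests (alphabetic chars vs letters, the rest vs separators), and recovers first-occurrence order by sorting the intersection with the letter set by s.find.
import Mathlib
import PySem

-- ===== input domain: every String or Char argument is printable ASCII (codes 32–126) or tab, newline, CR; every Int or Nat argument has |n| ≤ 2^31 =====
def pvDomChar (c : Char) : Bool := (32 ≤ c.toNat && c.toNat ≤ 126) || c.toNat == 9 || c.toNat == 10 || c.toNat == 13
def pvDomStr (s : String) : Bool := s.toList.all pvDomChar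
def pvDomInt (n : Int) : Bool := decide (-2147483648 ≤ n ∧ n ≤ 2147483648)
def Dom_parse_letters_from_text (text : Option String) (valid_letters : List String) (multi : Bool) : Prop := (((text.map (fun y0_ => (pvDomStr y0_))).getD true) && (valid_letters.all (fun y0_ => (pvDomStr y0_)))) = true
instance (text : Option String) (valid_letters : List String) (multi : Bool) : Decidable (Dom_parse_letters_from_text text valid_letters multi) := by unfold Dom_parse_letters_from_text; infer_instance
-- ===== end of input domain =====

-- B replaces A's per-character validation loop and seen-set dedup with set algebra over the distinct characters (two subset tests, then sorting the letter intersection by first occurrence); return values only, identical.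


-- ===== PORT A =====
-- A's validation loop with its early 'return []' (false = early return)
def pvA_validate (cs : List Char) (letterSet : PySem.Set String) (allowed : PySem.Set Char) : Bool :=
  match cs with
  | [] => true
  | ch :: rest =>
    if PySem.Chars.isalpha ch && !(PySem.Set.contains letterSet (String.ofList [ch])) then false
    else if !(PySem.Chars.isalpha ch) && !(PySem.Set.contains allowed ch) then false
    else pvA_validate rest letterSet allowed

-- one step of A's 'seen'-set dedup comprehension
def pvA_dedupStep (st : PySem.Set String × List String) (x : String) : PySem.Set String × List String :=
  if PySem.Set.contains st.1 x then st else (PySem.Set.add st.1 x, st.2 ++ [x])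

def parse_letters_from_text (text : Option String) (valid_letters : List String) (multi : Bool) : List String :=
  match text with
  | none => []
  | some t =>
    let s := PySem.Str.strip (PySem.Str.upper t)
    let letters := valid_letters.map PySem.Str.upper
    let letterSet := PySem.Set.ofList letters
    let allowed : PySem.Set Char := PySem.Set.ofList [',', ';', '/', '|', '+', ' ', '\n', '.', '(', ')', ':']
    if pvA_validate s.toList letterSet allowed then
      let preds0 := (s.toList.map (fun ch => String.ofList [ch])).filter (fun c => PySem.Set.contains letterSet c)
      let preds := (preds0.foldl pvA_dedupStep (PySem.Set.empty, [])).2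
      if !multi then (if preds.length == 1 then preds else []) else preds
    else []

-- ===== PORT B =====
-- B: distinct characters once, two subset tests, then sort the letter intersection by s.find.
-- (chars of the Python string are Chars here; 'c in letters' compares the one-char string, as the convention prescribes)
def parse_letters_from_text_alt (text : Option String) (valid_letters : List String) (multi : Bool) : List String :=
  match text with
  | none => []
  | some t =>
    let s := PySem.Str.strip (PySem.Str.upper t)
    let letters : PySem.Set String := PySem.Set.ofList (valid_letters.map PySem.Str.upper)
    let allowed : PySem.Set Char := PySem.Set.ofList ",;/|+ \n.():".toList
    let chars : PySem.Set Char := PySem.Set.ofList s.toList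
    let alphas : PySem.Set Char := PySem.Set.ofList (chars.filter PySem.Chars.isalpha)
    if !(alphas.all (fun c => PySem.Set.contains letters (String.ofList [c])) &&
         PySem.Set.issubset (PySem.Set.diff chars alphas) allowed) then []
    else
      -- chars & letters (elements kept as the one-char strings), sorted by first occurrence
      let inter : List String := (chars.filter (fun c => PySem.Set.contains letters (String.ofList [c]))).map (fun c => String.ofList [c])
      let preds := PySem.List.sorted inter (fun c => PySem.Str.find s c) false
      if multi || preds.length == 1 then preds else []

-- ===== PRECONDITION & SPEC =====
def Spec_parse_letters_from_text (text : Option String) (valid_letters : List String) (multi : Bool) (out : List String) : Prop := out = parse_letters_from_text_alt text valid_letters multi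
instance (text : Option String) (valid_letters : List String) (multi : Bool) (out : List String) : Decidable (Spec_parse_letters_from_text text valid_letters multi out) := by unfold Spec_parse_letters_from_text; infer_instance

-- ===== CLAIM (what is proved, stated in full; the proofs are below) =====
def Claim_equal_parse_letters_from_text : Prop := ∀ (text : Option String) (valid_letters : List String) (multi : Bool), Dom_parse_letters_from_text text valid_letters multi → Spec_parse_letters_from_text text valid_letters multi (parse_letters_from_text text valid_letters multi)

-- ===== LEMMAS AND PROOFS =====

-- A's dedup fold, started with seen-set = output list, collects exactly foldl Set.add
lemma pv_fold_dedup (l : List String) : ∀ (acc : List String),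
    (l.foldl pvA_dedupStep (acc, acc)).2 = l.foldl PySem.Set.add acc := by
  induction l with
  | nil => intro acc; simp
  | cons x rest ih =>
    intro acc
    simp only [List.foldl_cons, pvA_dedupStep, PySem.Set.add, PySem.Set.contains]
    by_cases hc : acc.contains x = true
    · simp only [hc, if_true, if_pos]
      exact ih acc
    · simp only [hc, if_false, if_neg, Bool.false_eq_true, not_false_iff]
      exact ih (acc ++ [x])

-- filtering commutes with Set.add
lemma pv_filter_add {α : Type} [BEq α] [LawfulBEq α] (q : α → Bool) (acc : List α) (x : α) :
    (PySem.Set.add acc x).filter q = if q x then PySem.Set.add (acc.filter q) x else acc.filter q := by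
  by_cases hm : x ∈ acc
  · have hc : acc.contains x = true := by simpa [List.contains_iff_mem] using hm
    by_cases hq : q x = true
    · have hc2 : (acc.filter q).contains x = true := by
        simp [List.contains_iff_mem, List.mem_filter]; exact ⟨hm, hq⟩
      simp [PySem.Set.add, hm, hc2, hq]
    · simp [PySem.Set.add, hm, hq]
  · have hc : acc.contains x = false := by simpa [List.contains_iff_mem] using hm
    by_cases hq : q x = true
    · have hc2 : (acc.filter q).contains x = false := by
        simp [List.contains_iff_mem, List.mem_filter]; tauto
      simp [PySem.Set.add, hm, hc2, hq, List.filter_append]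
    · simp [PySem.Set.add, hm, hq, List.filter_append]

-- foldl Set.add commutes with filter
lemma pv_foldadd_filter {α : Type} [BEq α] [LawfulBEq α] (q : α → Bool) :
    ∀ (l acc : List α), (l.foldl PySem.Set.add acc).filter q = (l.filter q).foldl PySem.Set.add (acc.filter q) := by
  intro l
  induction l with
  | nil => intro acc; simp
  | cons x rest ih =>
    intro acc
    rw [List.foldl_cons, ih, pv_filter_add]
    by_cases hq : q x = true
    · rw [if_pos hq, List.filter_cons, if_pos hq, List.foldl_cons]
    · rw [if_neg hq, List.filter_cons, if_neg hq]

-- foldl Set.add commutes with mapping an injective function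
lemma pv_foldadd_map {α β : Type} [BEq α] [LawfulBEq α] [BEq β] [LawfulBEq β]
    (f : α → β) (hf : Function.Injective f) :
    ∀ (l acc : List α), (l.map f).foldl PySem.Set.add (acc.map f) = (l.foldl PySem.Set.add acc).map f := by
  intro l
  induction l with
  | nil => intro acc; simp
  | cons x rest ih =>
    intro acc
    have hc : (acc.map f).contains (f x) = acc.contains x := by
      by_cases hm : x ∈ acc
      · have h2 : f x ∈ acc.map f := List.mem_map_of_mem hm
        simp [List.contains_iff_mem, hm, h2]
      · have h2 : f x ∉ acc.map f := by
          intro hmem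
          rw [List.mem_map] at hmem
          obtain ⟨a, ha, hfa⟩ := hmem
          exact hm (hf hfa ▸ ha)
        simp [List.contains_iff_mem, hm, h2]
    have hadd : PySem.Set.add (acc.map f) (f x) = (PySem.Set.add acc x).map f := by
      simp only [PySem.Set.add, PySem.Set.contains, hc]
      by_cases hm : x ∈ acc <;> simp [List.contains_iff_mem, hm]
    rw [List.map_cons, List.foldl_cons, List.foldl_cons, hadd, ih]

-- [a] is a prefix of l.drop j iff l[j] = a
lemma pv_singleton_prefix_drop {a : Char} {l : List Char} {j : ℕ} :
    [a] <+: l.drop j ↔ ∃ h : j < l.length, l[j] = a := by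
  constructor
  · rintro ⟨t, ht⟩
    have hlen : j < l.length := by
      by_contra h
      have hnil : l.drop j = [] := List.drop_eq_nil_of_le (by omega)
      rw [hnil] at ht; simp at ht
    refine ⟨hlen, ?_⟩
    rw [List.drop_eq_getElem_cons hlen] at ht
    have ht' : a :: t = l[j] :: l.drop (j + 1) := ht
    exact (List.cons.injEq _ _ _ _).mp ht' |>.1.symm
  · rintro ⟨h, rfl⟩
    exact ⟨l.drop (j + 1), (List.drop_eq_getElem_cons h).symm⟩

-- the first occurrence of a character of the prefix lies inside the prefix
lemma pv_find_lt_of_mem_prefix {pre suf : List Char} {a : Char} (ha : a ∈ pre) :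
    PySem.Chars.find (pre ++ suf) [a] < pre.length := by
  obtain ⟨j, hj, hja⟩ := List.mem_iff_getElem.mp ha
  have hjlen : j < (pre ++ suf).length := by simp; omega
  have hjcs : (pre ++ suf)[j] = a := by rw [List.getElem_append_left hj]; exact hja
  have hpref : [a] <+: (pre ++ suf).drop j := pv_singleton_prefix_drop.mpr ⟨hjlen, hjcs⟩
  have hnn : 0 ≤ PySem.Chars.find (pre ++ suf) [a] := by
    rw [PySem.Chars.find_nonneg_iff, List.singleton_infix_iff]
    exact List.mem_append.mpr (Or.inl ha)
  obtain ⟨_, h2⟩ := PySem.Chars.find_spec hnn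
  by_contra hge
  push_neg at hge
  have hjlt : j < (PySem.Chars.find (pre ++ suf) [a]).toNat := by omega
  exact h2 j hjlt hpref

-- a character not occurring in the prefix is first found at or after the prefix's end
lemma pv_find_ge_of_not_mem_prefix {pre rest : List Char} {a : Char} (ha : a ∉ pre) :
    (pre.length : ℤ) ≤ PySem.Chars.find (pre ++ a :: rest) [a] := by
  have hnn : 0 ≤ PySem.Chars.find (pre ++ a :: rest) [a] := by
    rw [PySem.Chars.find_nonneg_iff, List.singleton_infix_iff]
    simp
  obtain ⟨h1, _⟩ := PySem.Chars.find_spec hnn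
  by_contra hlt
  push_neg at hlt
  obtain ⟨hh, he⟩ := pv_singleton_prefix_drop.mp h1
  have htn : (PySem.Chars.find (pre ++ a :: rest) [a]).toNat < pre.length := by omega
  rw [List.getElem_append_left htn] at he
  exact ha (he ▸ List.getElem_mem htn)

-- folding Set.add over the rest of cs keeps first-occurrence positions increasing
lemma pv_foldadd_pairwise (cs : List Char) :
    ∀ (suf pre acc : List Char), cs = pre ++ suf → (∀ a, a ∈ acc ↔ a ∈ pre) →
      acc.Pairwise (fun a b => PySem.Chars.find cs [a] ≤ PySem.Chars.find cs [b]) →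
      (suf.foldl PySem.Set.add acc).Pairwise (fun a b => PySem.Chars.find cs [a] ≤ PySem.Chars.find cs [b]) := by
  intro suf
  induction suf with
  | nil => intro pre acc _ _ hp; simpa using hp
  | cons c rest ih =>
    intro pre acc hcs hmem hp
    rw [List.foldl_cons]
    by_cases hm : acc.contains c = true
    · have hca : c ∈ acc := by simpa [List.contains_iff_mem] using hm
      have hmc : c ∈ pre := (hmem c).mp hca
      have hacc : PySem.Set.add acc c = acc := by simp [PySem.Set.add, PySem.Set.contains, hca]
      rw [hacc]
      refine ih (pre ++ [c]) acc (by simp [hcs]) ?_ hp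
      intro a
      rw [hmem a, List.mem_append, List.mem_singleton]
      constructor
      · exact Or.inl
      · rintro (h | rfl)
        · exact h
        · exact hmc
    · have hmc : c ∉ acc := by simpa [List.contains_iff_mem] using hm
      have hcp : c ∉ pre := fun h => hmc ((hmem c).mpr h)
      have hgec : (pre.length : ℤ) ≤ PySem.Chars.find cs [c] := by
        rw [hcs]; exact pv_find_ge_of_not_mem_prefix hcp
      have hplt : ∀ a ∈ acc, PySem.Chars.find cs [a] ≤ PySem.Chars.find cs [c] := by
        intro a haa
        have hap : a ∈ pre := (hmem a).mp haa
        have hlt := pv_find_lt_of_mem_prefix (suf := c :: rest) hap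
        rw [← hcs] at hlt
        omega
      have hadd : PySem.Set.add acc c = acc ++ [c] := by simp [PySem.Set.add, PySem.Set.contains, hmc]
      rw [hadd]
      refine ih (pre ++ [c]) (acc ++ [c]) (by simp [hcs]) ?_ ?_
      · intro a
        simp [hmem a]
      · rw [List.pairwise_append]
        refine ⟨hp, List.pairwise_singleton _ _, ?_⟩
        intro a haa b hb
        rw [List.mem_singleton] at hb
        subst hb
        exact hplt a haa

-- the ordered-unique characters of cs are pairwise increasing in first-occurrence position
lemma pv_ofList_pairwise_find (cs : List Char) :
    (PySem.Set.ofList cs).Pairwise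
      (fun a b => PySem.Chars.find cs [a] ≤ PySem.Chars.find cs [b]) := by
  rw [PySem.Set.ofList_eq_foldl]
  exact pv_foldadd_pairwise cs cs [] [] rfl (by simp) (by simp)

-- A's validation loop is the all-check over the characters
lemma pv_validate_eq_all (L : PySem.Set String) (AC : PySem.Set Char) :
    ∀ cs : List Char, pvA_validate cs L AC =
      cs.all (fun ch => if PySem.Chars.isalpha ch then PySem.Set.contains L (String.ofList [ch])
                        else PySem.Set.contains AC ch) := by
  intro cs
  induction cs with
  | nil => rfl
  | cons ch rest ih =>
    by_cases ha : PySem.Chars.isalpha ch = true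
    · by_cases hl : String.ofList [ch] ∈ L
      · simp [pvA_validate, ha, hl, PySem.Set.contains, List.contains_iff_mem, ih]
      · simp [pvA_validate, ha, hl, PySem.Set.contains, List.contains_iff_mem]
    · have ha' : PySem.Chars.isalpha ch = false := by simpa using ha
      by_cases hl : ch ∈ AC
      · simp [pvA_validate, ha', hl, PySem.Set.contains, List.contains_iff_mem, ih]
      · simp [pvA_validate, ha', hl, PySem.Set.contains, List.contains_iff_mem]

-- A's validation equals B's two subset tests
lemma pv_cond_eq (cs : List Char) (L : PySem.Set String) (AC : PySem.Set Char) :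
    pvA_validate cs L AC =
      ((PySem.Set.ofList ((PySem.Set.ofList cs).filter PySem.Chars.isalpha)).all
          (fun c => PySem.Set.contains L (String.ofList [c])) &&
        PySem.Set.issubset
          (PySem.Set.diff (PySem.Set.ofList cs) (PySem.Set.ofList ((PySem.Set.ofList cs).filter PySem.Chars.isalpha)))
          AC) := by
  rw [pv_validate_eq_all, Bool.eq_iff_iff]
  simp only [List.all_eq_true, Bool.and_eq_true, PySem.Set.issubset, PySem.Set.diff,
    PySem.Set.mem_ofList, List.mem_filter, Bool.not_eq_true',
    PySem.Set.contains_eq_listContains, List.contains_iff_mem]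
  constructor
  · intro h
    refine ⟨fun c hc => ?_, fun c hc => ?_⟩
    · have hv := h c hc.1
      rw [if_pos hc.2] at hv
      simpa using hv
    · obtain ⟨hc1, hc2⟩ := hc
      have hna : PySem.Chars.isalpha c = false := by
        by_contra hcon
        rw [Bool.not_eq_false] at hcon
        have hmemf : c ∈ PySem.Set.ofList (List.filter PySem.Chars.isalpha (PySem.Set.ofList cs)) := by
          rw [PySem.Set.mem_ofList, List.mem_filter, PySem.Set.mem_ofList]
          exact ⟨hc1, hcon⟩
        rw [← List.contains_iff_mem] at hmemf
        rw [hc2] at hmemf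
        exact absurd hmemf (by simp)
      have hv := h c hc1
      rw [if_neg (by simp [hna])] at hv
      simpa using hv
  · rintro ⟨h1, h2⟩ c hc
    by_cases ha : PySem.Chars.isalpha c = true
    · rw [if_pos ha, List.contains_iff_mem]
      exact h1 c ⟨hc, ha⟩
    · rw [if_neg ha, List.contains_iff_mem]
      apply h2 c
      refine ⟨hc, ?_⟩
      rw [← Bool.not_eq_true, List.contains_iff_mem]
      intro hmemf
      rw [PySem.Set.mem_ofList, List.mem_filter] at hmemf
      exact ha hmemf.2

-- ===== VERDICT (by name: the statement is the Claim_ definition above) =====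
theorem parse_letters_from_text_spec : Claim_equal_parse_letters_from_text := by
  intro text valid_letters multi _
  unfold Spec_parse_letters_from_text parse_letters_from_text parse_letters_from_text_alt
  cases text with
  | none => rfl
  | some t =>
    simp only []
    rw [show (",;/|+ \n.():".toList : List Char) = [',', ';', '/', '|', '+', ' ', '\n', '.', '(', ')', ':'] from by decide]
    generalize PySem.Str.strip (PySem.Str.upper t) = s
    generalize hL : PySem.Set.ofList (valid_letters.map PySem.Str.upper) = L
    generalize hAC : (PySem.Set.ofList [',', ';', '/', '|', '+', ' ', '\n', '.', '(', ')', ':'] : PySem.Set Char) = AC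
    have hcond := pv_cond_eq s.toList L AC
    have hσ : Function.Injective (fun ch : Char => String.ofList [ch]) := by
      intro a b hab
      simpa using congrArg String.toList hab
    have hpreds :
        (((s.toList.map (fun ch => String.ofList [ch])).filter (fun c => PySem.Set.contains L c)).foldl
            pvA_dedupStep (PySem.Set.empty, [])).2 =
          PySem.List.sorted
            (((PySem.Set.ofList s.toList).filter (fun c => PySem.Set.contains L (String.ofList [c]))).map
              (fun c => String.ofList [c]))
            (fun c => PySem.Str.find s c) false := by
      have h1 := pv_fold_dedup
        ((s.toList.map (fun ch => String.ofList [ch])).filter (fun c => PySem.Set.contains L c)) []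
      have h2 : ((s.toList.map (fun ch => String.ofList [ch])).filter (fun c => PySem.Set.contains L c))
          = ((s.toList.filter (fun c => PySem.Set.contains L (String.ofList [c]))).map (fun ch => String.ofList [ch])) := by
        rw [List.filter_map]
        rfl
      have h3' : ((s.toList.filter (fun c => PySem.Set.contains L (String.ofList [c]))).map
            (fun ch => String.ofList [ch])).foldl PySem.Set.add ([] : List String)
          = ((s.toList.filter (fun c => PySem.Set.contains L (String.ofList [c]))).foldl PySem.Set.add []).map
            (fun ch => String.ofList [ch]) := by
        simpa using pv_foldadd_map (fun ch : Char => String.ofList [ch]) hσ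
          (s.toList.filter (fun c => PySem.Set.contains L (String.ofList [c]))) []
      have h4' : (s.toList.foldl PySem.Set.add ([] : List Char)).filter
            (fun c => PySem.Set.contains L (String.ofList [c]))
          = (s.toList.filter (fun c => PySem.Set.contains L (String.ofList [c]))).foldl PySem.Set.add [] := by
        simpa using pv_foldadd_filter (fun c : Char => PySem.Set.contains L (String.ofList [c])) s.toList []
      have hsorted : PySem.List.sorted
            (((PySem.Set.ofList s.toList).filter (fun c => PySem.Set.contains L (String.ofList [c]))).map
              (fun c => String.ofList [c]))
            (fun c => PySem.Str.find s c) false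
          = (((PySem.Set.ofList s.toList).filter (fun c => PySem.Set.contains L (String.ofList [c]))).map
              (fun c => String.ofList [c])) := by
        apply PySem.List.sorted_eq_self_of_pairwise
        rw [List.pairwise_map]
        have hpw := (pv_ofList_pairwise_find s.toList).filter
          (fun c : Char => PySem.Set.contains L (String.ofList [c]))
        apply hpw.imp
        intro a b hab
        have hfa : PySem.Str.find s (String.ofList [a]) = PySem.Chars.find s.toList [a] := by
          simp [PySem.Str.find]
        have hfb : PySem.Str.find s (String.ofList [b]) = PySem.Chars.find s.toList [b] := by
          simp [PySem.Str.find]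
        rw [hfa, hfb]
        exact hab
      rw [hsorted]
      simp only [PySem.Set.empty]
      rw [h1, h2, h3', ← h4', ← PySem.Set.ofList_eq_foldl]
    rw [hcond]
    set C := ((PySem.Set.ofList ((PySem.Set.ofList s.toList).filter PySem.Chars.isalpha)).all
          (fun c => PySem.Set.contains L (String.ofList [c])) &&
        PySem.Set.issubset
          (PySem.Set.diff (PySem.Set.ofList s.toList) (PySem.Set.ofList ((PySem.Set.ofList s.toList).filter PySem.Chars.isalpha)))
          AC) with hCdef
    by_cases hc : C = true
    · have hnb : ¬((!C) = true) := by simp [hc]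
      rw [if_pos hc, if_neg hnb, hpreds]
      cases multi with
      | true => simp only [Bool.not_true, Bool.true_or, if_false, if_true, Bool.false_eq_true]
      | false => simp only [Bool.not_false, Bool.false_or, if_true]
    · have hCf : C = false := by simpa using hc
      have hb : ((!C) = true) := by simp [hCf]
      rw [if_neg hc, if_pos hb]
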